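-- pv_equiv track=rewrite | github.com/kaelthasmanu/SquidStats | services/squid/acls_service.py | _remove_old_blocklist_acls
-- ===== SOURCE A (Python) =====
-- BLOCKLIST_PREFIX = "blocklist_"
--
-- def _remove_old_blocklist_acls(lines: list[str], acl_name: str) -> list[str]:
--     """Remove existing blocklist ACL lines and their comments for *acl_name*."""
--     filtered: list[str] = []
--     skip_comment = False
--     for _i, line in enumerate(lines):
--         stripped = line.strip()
--         is_blocklist_acl = (
--             stripped.startswith(f"acl {acl_name} ")
--             and "dstdomain" in stripped
--             and BLOCKLIST_PREFIX in stripped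
--         )
--         if is_blocklist_acl:
--             # Also remove the comment immediately above if it's ours
--             if filtered and filtered[-1].strip().startswith("# Blocklist"):
--                 filtered.pop()
--             continue
--         # Remove standalone blocklist comment lines that precede a removed ACL
--         if skip_comment:
--             skip_comment = False
--             continue
--         filtered.append(line)
--     return filtered
-- ===== SOURCE B (Python) =====
-- BLOCKLIST_PREFIX = "blocklist_"
--
-- def _remove_old_blocklist_acls(lines: list[str], acl_name: str) -> list[str]:
--     """Single backward pass: each blocklist ACL grants one 'delete credit' that
--     consumes the nearest preceding '# Blocklist' comment; a kept line resets credits."""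
--     prefix = f"acl {acl_name} "
--     result: list[str] = []
--     credits = 0
--     for line in reversed(lines):
--         stripped = line.strip()
--         if stripped.startswith(prefix) and "dstdomain" in stripped and BLOCKLIST_PREFIX in stripped:
--             credits += 1
--         elif credits > 0 and stripped.startswith("# Blocklist"):
--             credits -= 1
--         else:
--             credits = 0
--             result.append(line)
--     result.reverse()
--     return result
-- ===== Notes on version B (the rewrite author's own statement) =====
-- stated objective: alternative
-- what changed: Replaces A's forward pass that appends lines and retracts (pops) an already-appended '# Blocklist' comment when a blocklist ACL follows, by a single backward pass over reversed(lines) with a delete-credit counter: each blocklist ACL grants a credit, a credit consumes the nearest preceding blocklist comment, any kept line resets the credits; no retraction, no dead skip_comment flag, and the f-string ACL prefix is built once before the loop instead of once per line.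
import Mathlib
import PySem

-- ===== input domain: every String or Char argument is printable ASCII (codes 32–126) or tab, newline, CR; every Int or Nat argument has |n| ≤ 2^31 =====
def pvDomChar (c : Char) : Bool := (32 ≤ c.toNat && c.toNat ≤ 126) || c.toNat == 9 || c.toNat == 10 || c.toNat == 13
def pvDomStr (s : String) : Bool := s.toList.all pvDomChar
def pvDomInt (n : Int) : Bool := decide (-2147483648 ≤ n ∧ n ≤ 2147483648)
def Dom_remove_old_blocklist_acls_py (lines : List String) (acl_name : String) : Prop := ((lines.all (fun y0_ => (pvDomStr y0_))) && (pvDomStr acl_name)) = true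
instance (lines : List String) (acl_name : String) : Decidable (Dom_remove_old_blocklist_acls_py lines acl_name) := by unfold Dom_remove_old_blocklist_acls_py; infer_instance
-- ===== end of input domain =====

-- B replaces A's forward pass with list.pop retraction by a single backward pass with a
-- credit counter (objective: alternative decomposition, same O(n) cost, no retraction).

-- shared line tests (verbatim the same expressions in both Python sources)
def pvIsBlocklistAcl (acl_name : String) (line : String) : Bool :=
  let stripped := PySem.Str.strip line
  PySem.Str.startswith stripped ("acl " ++ acl_name ++ " ")
    && PySem.Str.isIn "dstdomain" stripped
    && PySem.Str.isIn "blocklist_" stripped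

def pvIsBlockComment (line : String) : Bool :=
  PySem.Str.startswith (PySem.Str.strip line) "# Blocklist"

-- ===== PORT A =====
-- `filtered and filtered[-1].strip().startswith("# Blocklist")`
def pvEndsComment (filtered : List String) : Bool :=
  match filtered.getLast? with
  | some last => pvIsBlockComment last
  | none => false

-- the for-loop, state = (filtered, skip_comment)
def pvALoop (acl_name : String) (lines : List String) (st : List String × Bool) :
    List String × Bool :=
  match lines with
  | [] => st
  | line :: rest =>
    if pvIsBlocklistAcl acl_name line then
      pvALoop acl_name rest
        (if pvEndsComment st.1 then (st.1.dropLast, st.2) else (st.1, st.2))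
    else if st.2 then
      pvALoop acl_name rest (st.1, false)
    else
      pvALoop acl_name rest (st.1 ++ [line], st.2)

def remove_old_blocklist_acls_py (lines : List String) (acl_name : String) : List String :=
  (pvALoop acl_name lines ([], false)).1

-- ===== PORT B =====
-- the for-loop over reversed(lines), state = (result, credits); result reversed by caller
def pvBLoop (acl_name : String) (rev : List String) (result : List String) (credits : Nat) :
    List String :=
  match rev with
  | [] => result
  | line :: rest =>
    if pvIsBlocklistAcl acl_name line then
      pvBLoop acl_name rest result (credits + 1)
    else if credits > 0 && pvIsBlockComment line then
      pvBLoop acl_name rest result (credits - 1)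
    else
      pvBLoop acl_name rest (result ++ [line]) 0

def remove_old_blocklist_acls_py_alt (lines : List String) (acl_name : String) : List String :=
  (pvBLoop acl_name lines.reverse [] 0).reverse

-- ===== PRECONDITION & SPEC =====
def Spec_remove_old_blocklist_acls_py (lines : List String) (acl_name : String) (out : List String) : Prop := out = remove_old_blocklist_acls_py_alt lines acl_name
instance (lines : List String) (acl_name : String) (out : List String) : Decidable (Spec_remove_old_blocklist_acls_py lines acl_name out) := by unfold Spec_remove_old_blocklist_acls_py; infer_instance

-- ===== CLAIM (what is proved, stated in full; the proofs are below) =====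
def Claim_equal_remove_old_blocklist_acls_py : Prop := ∀ (lines : List String) (acl_name : String), Dom_remove_old_blocklist_acls_py lines acl_name → Spec_remove_old_blocklist_acls_py lines acl_name (remove_old_blocklist_acls_py lines acl_name)

-- ===== LEMMAS AND PROOFS =====

-- right-to-left scan as a foldr: (kept lines in original order, credit emerging on the left)
def pvFc (acl_name : String) (lines : List String) (c : Nat) : List String × Nat :=
  match lines with
  | [] => ([], c)
  | line :: rest =>
    let (res, c') := pvFc acl_name rest c
    if pvIsBlocklistAcl acl_name line then (res, c' + 1)
    else if c' > 0 && pvIsBlockComment line then (res, c' - 1)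
    else (line :: res, 0)

-- acc with up to c trailing "# Blocklist" comments removed
def pvTrim (acc : List String) (c : Nat) : List String :=
  match c with
  | 0 => acc
  | c + 1 => if pvEndsComment acc then pvTrim acc.dropLast c else acc

theorem pvTrim_of_not_ends (acc : List String) (c : Nat) (h : pvEndsComment acc = false) :
    pvTrim acc c = acc := by
  cases c <;> simp [pvTrim, h]

theorem pvFc_append (a : String) (xs ys : List String) (c : Nat) :
    pvFc a (xs ++ ys) c =
      ((pvFc a xs (pvFc a ys c).2).1 ++ (pvFc a ys c).1, (pvFc a xs (pvFc a ys c).2).2) := by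
  induction xs with
  | nil => simp [pvFc]
  | cons x xs ih =>
    simp only [List.cons_append, pvFc, ih]
    split <;> simp_all <;> split <;> simp_all

theorem pvBLoop_eq (a : String) (rev : List String) :
    ∀ (c : Nat) (result : List String),
      pvBLoop a rev result c = result ++ (pvFc a rev.reverse c).1.reverse := by
  induction rev with
  | nil => intro c result; simp [pvBLoop, pvFc]
  | cons l rest ih =>
    intro c result
    have hfc : pvFc a [l] c =
        (if pvIsBlocklistAcl a l then ([], c + 1)
         else if c > 0 && pvIsBlockComment l then ([], c - 1) else ([l], 0)) := by
      simp only [pvFc]; split <;> simp_all <;> split <;> simp_all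
    simp only [pvBLoop, List.reverse_cons, pvFc_append, hfc]
    split
    · rename_i h; simp [h, ih]
    · rename_i h
      split
      · rename_i h2; simp [h, h2, ih]
      · rename_i h2; simp [h, h2, ih]

theorem pvB_eq_Fc (lines : List String) (a : String) :
    remove_old_blocklist_acls_py_alt lines a = (pvFc a lines 0).1 := by
  simp [remove_old_blocklist_acls_py_alt, pvBLoop_eq]

theorem pvALoop_eq (a : String) (lines : List String) :
    ∀ acc : List String,
      (pvALoop a lines (acc, false)).1 =
        pvTrim acc (pvFc a lines 0).2 ++ (pvFc a lines 0).1 := by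
  induction lines with
  | nil => intro acc; simp [pvALoop, pvFc, pvTrim]
  | cons l rest ih =>
    intro acc
    simp only [pvALoop, pvFc]
    split
    · rename_i h
      -- acl line: pop trailing comment if present, credit + 1 on the spec side
      by_cases he : pvEndsComment acc = true
      · simp only [he, if_pos, ih]
        have : pvTrim acc ((pvFc a rest 0).2 + 1) = pvTrim acc.dropLast (pvFc a rest 0).2 := by
          simp [pvTrim, he]
        simp_all
      · simp only [Bool.not_eq_true] at he
        simp only [he, Bool.false_eq_true, if_neg, not_false_iff, ih]
        rw [pvTrim_of_not_ends _ _ he, pvTrim_of_not_ends _ _ he]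
    · rename_i h
      -- not an acl line: appended (skip_comment is always False)
      simp only [Bool.false_eq_true, if_neg, not_false_iff, ih]
      by_cases hcom : pvIsBlockComment l = true
      · by_cases hpos : 0 < (pvFc a rest 0).2
        · obtain ⟨c', hc'⟩ : ∃ c', (pvFc a rest 0).2 = c' + 1 := ⟨(pvFc a rest 0).2 - 1, by omega⟩
          have hends : pvEndsComment (acc ++ [l]) = true := by
            simp [pvEndsComment, hcom]
          have ht : pvTrim (acc ++ [l]) ((pvFc a rest 0).2) = pvTrim acc c' := by
            rw [hc']; simp [pvTrim, hends, List.dropLast_concat]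
          simp [hpos, hcom]
          rw [hc'] at ht ⊢
          simpa using ht
        · have h0 : (pvFc a rest 0).2 = 0 := by omega
          simp [h0, pvTrim, hcom]
      · have hends : pvEndsComment (acc ++ [l]) = false := by
          simp only [Bool.not_eq_true] at hcom
          simp [pvEndsComment, List.getLast?_concat, hcom]
        rw [pvTrim_of_not_ends _ _ hends]
        simp [hcom, pvTrim]

-- ===== VERDICT (by name: the statement is the Claim_ definition above) =====
theorem remove_old_blocklist_acls_py_spec : Claim_equal_remove_old_blocklist_acls_py := by
  intro lines acl_name _
  show _ = _
  rw [remove_old_blocklist_acls_py, pvALoop_eq, pvB_eq_Fc,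
    pvTrim_of_not_ends _ _ rfl, List.nil_append]
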